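-- pv_equiv track=rewrite | github.com/Danigom11/cursoPython | Día 5/Interaccion_Funciones.py | reducir_lista
-- ===== SOURCE A (Python) =====
-- def reducir_lista(lista):
--     lista_sin_repetidos = []
--     elemento_mas_alto = 0
--     for numero in lista:
--         if numero not in lista_sin_repetidos:
--             lista_sin_repetidos.append(numero)
--         if numero > elemento_mas_alto:
--             elemento_mas_alto = numero
--     lista_sin_repetidos.remove(elemento_mas_alto)
--     return lista_sin_repetidos
-- ===== SOURCE B (Python) =====
-- def reducir_lista(lista):
--     items = list(lista)
--     mayor = 0
--     restantes = {}
--     for x in items: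
--         if x > mayor:
--             mayor = x
--         restantes[x] = restantes.get(x, 0) + 1
--     resultado = []
--     for x in reversed(items):
--         restantes[x] -= 1
--         if restantes[x] == 0 and x != mayor:
--             resultado.append(x)
--     resultado.reverse()
--     return resultado
-- ===== Notes on version B (the rewrite author's own statement) =====
-- stated objective: faster
-- what changed: B replaces A's grow-and-scan dedup plus list.remove with a two-phase counting algorithm: one pass builds a dict of occurrence counts (and the max), then a reverse traversal keeps each element exactly when its remaining count reaches zero (its first occurrence), dropping the max inline and building the output back-to-front.
import Mathlib
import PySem

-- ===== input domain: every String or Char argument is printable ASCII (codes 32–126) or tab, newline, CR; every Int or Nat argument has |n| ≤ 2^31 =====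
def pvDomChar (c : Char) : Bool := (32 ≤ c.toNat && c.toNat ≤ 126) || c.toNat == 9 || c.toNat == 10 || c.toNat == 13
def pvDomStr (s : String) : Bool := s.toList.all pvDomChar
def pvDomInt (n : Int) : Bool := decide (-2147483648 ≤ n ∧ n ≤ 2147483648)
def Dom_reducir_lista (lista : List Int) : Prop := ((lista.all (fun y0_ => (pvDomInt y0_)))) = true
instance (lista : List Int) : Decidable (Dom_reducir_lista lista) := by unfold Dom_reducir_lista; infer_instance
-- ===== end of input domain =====

-- B replaces A's grow-and-scan dedup + list.remove with a counting pass followed by a reverse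
-- traversal that keeps each element when its remaining count hits zero (its first occurrence),
-- dropping the max inline and building the output back-to-front.

-- ===== PORT A =====
def reducir_lista (lista : List Int) : List Int :=
  let st := lista.foldl
    (fun (s : List Int × Int) numero =>
      (if numero ∉ s.1 then s.1 ++ [numero] else s.1,
       if numero > s.2 then numero else s.2))
    ([], 0)
  -- lista_sin_repetidos.remove(elemento_mas_alto): raises ValueError when absent (excluded by Pre_)
  (PySem.List.remove? st.1 st.2).getD []

-- ===== PORT B =====
def reducir_lista_alt (lista : List Int) : List Int :=
  let st := lista.foldl
    (fun (s : Int × PySem.Dict Int Int) x =>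
      ((if x > s.1 then x else s.1), s.2.insert x (s.2.getD x 0 + 1)))
    (0, PySem.Dict.empty)
  -- restantes[x] -= 1 : x is always a key here (it came from items), so getD is exact
  let st2 := lista.reverse.foldl
    (fun (s : PySem.Dict Int Int × List Int) x =>
      let d := s.1.insert x (s.1.getD x 0 - 1)
      (d, if d.getD x 0 = 0 ∧ x ≠ st.1 then s.2 ++ [x] else s.2))
    (st.2, [])
  st2.2.reverse

-- ===== PRECONDITION & SPEC =====
-- Pre_ excludes exactly the inputs (empty or all-negative lists) on which A's list.remove raises ValueError.
def Pre_reducir_lista (lista : List Int) : Prop := ∃ x ∈ lista, 0 ≤ x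
instance (lista : List Int) : Decidable (Pre_reducir_lista lista) := by unfold Pre_reducir_lista; infer_instance
def pvWitness_reducir_lista : List Int := [3, 1, 3, -2]

def Spec_reducir_lista (lista : List Int) (out : List Int) : Prop := out = reducir_lista_alt lista
instance (lista : List Int) (out : List Int) : Decidable (Spec_reducir_lista lista out) := by unfold Spec_reducir_lista; infer_instance

-- ===== CLAIM (what is proved, stated in full; the proofs are below) =====
def Claim_equal_reducir_lista : Prop := ∀ (lista : List Int), Dom_reducir_lista lista → Pre_reducir_lista lista → Spec_reducir_lista lista (reducir_lista lista)

-- ===== LEMMAS AND PROOFS =====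

-- A's dedup loop is the Set.add fold.
theorem pv_dedup_eq_add (l : List Int) (a : List Int) :
    l.foldl (fun a n => if n ∉ a then a ++ [n] else a) a = l.foldl PySem.Set.add a := by
  induction l generalizing a with
  | nil => rfl
  | cons x t ih =>
    simp only [List.foldl]
    have : (if x ∉ a then a ++ [x] else a) = PySem.Set.add a x := by
      by_cases h : x ∈ a <;> simp [PySem.Set.add, h]
    rw [this]; exact ih _

-- the running max of both programs is foldl max.
theorem pv_runmax_eq (l : List Int) (m : Int) :
    l.foldl (fun m n => if n > m then n else m) m = l.foldl max m := by
  induction l generalizing m with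
  | nil => rfl
  | cons x t ih =>
    simp only [List.foldl]
    have : (if x > m then x else m) = max m x := by
      rw [max_def]; split_ifs <;> omega
    rw [this]; exact ih _

theorem pv_le_foldl_max (l : List Int) (m : Int) : m ≤ l.foldl max m := by
  induction l generalizing m with
  | nil => simp
  | cons x t ih => exact le_trans (le_max_left m x) (ih _)

theorem pv_mem_le_foldl_max (l : List Int) (m : Int) : ∀ x ∈ l, x ≤ l.foldl max m := by
  induction l generalizing m with
  | nil => simp
  | cons y t ih =>
    intro x hx
    rcases List.mem_cons.mp hx with h | h
    · subst h; exact le_trans (le_max_right m x) (pv_le_foldl_max _ _)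
    · exact ih _ x h

theorem pv_foldl_max_mem (l : List Int) (m : Int) :
    l.foldl max m = m ∨ l.foldl max m ∈ l := by
  induction l generalizing m with
  | nil => simp
  | cons x t ih =>
    simp only [List.foldl]
    rcases ih (max m x) with h | h
    · rcases max_choice m x with hm | hm
      · left; rw [h, hm]
      · right; rw [h, hm]; exact List.mem_cons_self
    · right; exact List.mem_cons_of_mem _ h

-- Under Pre_, the running max is an element of the list.
theorem pv_mayor_mem (l : List Int) (h : ∃ x ∈ l, 0 ≤ x) : l.foldl max 0 ∈ l := by
  rcases pv_foldl_max_mem l 0 with h0 | h0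
  · rcases h with ⟨x, hx, hx0⟩
    have hle := pv_mem_le_foldl_max l 0 x hx
    rw [h0] at hle
    have : x = 0 := le_antisymm hle hx0
    rw [h0, ← this]; exact hx
  · exact h0

-- the elements B's reverse pass keeps, in traversal order: last occurrences ≠ m
def pvKeepLast (r : List Int) (m : Int) : List Int :=
  match r with
  | [] => []
  | x :: t => if x ∉ t ∧ x ≠ m then x :: pvKeepLast t m else pvKeepLast t m

-- B's reverse loop computes pvKeepLast, given a dict of remaining occurrence counts.
theorem pv_B_loop (m : Int) (r : List Int) (d : PySem.Dict Int Int) (acc : List Int)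
    (hd : ∀ y, d.getD y 0 = r.count y) :
    (r.foldl
      (fun (s : PySem.Dict Int Int × List Int) x =>
        let d := s.1.insert x (s.1.getD x 0 - 1)
        (d, if d.getD x 0 = 0 ∧ x ≠ m then s.2 ++ [x] else s.2))
      (d, acc)).2 = acc ++ pvKeepLast r m := by
  induction r generalizing d acc with
  | nil => simp [pvKeepLast]
  | cons x t ih =>
    simp only [List.foldl]
    have hx : (d.insert x (d.getD x 0 - 1)).getD x 0 = t.count x := by
      rw [PySem.Dict.getD_insert_self, hd x, List.count_cons_self]
      push_cast; omega
    have hinv : ∀ y, (d.insert x (d.getD x 0 - 1)).getD y 0 = t.count y := by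
      intro y
      by_cases hy : y = x
      · subst hy; exact hx
      · rw [PySem.Dict.getD_insert_of_ne (k := x) (k' := y) d _ _ hy, hd y]
        simp [Ne.symm hy]
    have hcnt : (t.count x = 0) ↔ x ∉ t := by
      rw [List.count_eq_zero]
    show (t.foldl _ (d.insert x (d.getD x 0 - 1),
        if (d.insert x (d.getD x 0 - 1)).getD x 0 = 0 ∧ x ≠ m then acc ++ [x] else acc)).2
        = acc ++ pvKeepLast (x :: t) m
    rw [hx]
    by_cases hc : (t.count x : Int) = 0 ∧ x ≠ m
    · have hnot : x ∉ t := hcnt.mp (by exact_mod_cast hc.1)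
      rw [if_pos hc, ih _ _ hinv]
      simp [pvKeepLast, hnot, hc.2]
    · rw [if_neg hc, ih _ _ hinv]
      have : ¬ (x ∉ t ∧ x ≠ m) := by
        intro ⟨h1, h2⟩
        exact hc ⟨by exact_mod_cast hcnt.mpr h1, h2⟩
      simp [pvKeepLast, this]

-- pvKeepLast of the reversed list, reversed back, is the filtered order-preserving dedup.
theorem pv_keepLast_reverse (l : List Int) (m : Int) :
    (pvKeepLast l.reverse m).reverse = (PySem.Set.ofList l).filter (fun y => y ≠ m) := by
  induction l using List.reverseRecOn with
  | nil => simp [pvKeepLast]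
  | append_singleton t x ih =>
    have hofL : PySem.Set.ofList (t ++ [x]) = PySem.Set.add (PySem.Set.ofList t) x := by
      rw [PySem.Set.ofList_eq_foldl, PySem.Set.ofList_eq_foldl, List.foldl_append]
      rfl
    rw [List.reverse_append]
    simp only [List.reverse_cons, List.reverse_nil, List.nil_append, List.singleton_append]
    show (pvKeepLast (x :: t.reverse) m).reverse = _
    rw [hofL]
    by_cases hmem : x ∈ t
    · have hadd : PySem.Set.add (PySem.Set.ofList t) x = PySem.Set.ofList t := by
        unfold PySem.Set.add
        rw [(PySem.Set.contains_iff _ x).mpr (by rw [PySem.Set.mem_ofList]; exact hmem)]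
        simp
      have : ¬ (x ∉ t.reverse ∧ x ≠ m) := by simp [hmem]
      simp only [pvKeepLast, if_neg this]
      rw [ih, hadd]
    · have hadd : PySem.Set.add (PySem.Set.ofList t) x = PySem.Set.ofList t ++ [x] := by
        unfold PySem.Set.add
        rw [show PySem.Set.contains (PySem.Set.ofList t) x = false from by
          rw [Bool.eq_false_iff]; intro h
          exact hmem (by rw [← PySem.Set.mem_ofList]; exact (PySem.Set.contains_iff _ x).mp h)]
        simp
      rw [hadd, List.filter_append]
      by_cases hm : x = m
      · have : ¬ (x ∉ t.reverse ∧ x ≠ m) := by simp [hm]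
        simp only [pvKeepLast, if_neg this]
        rw [ih]
        simp [hm]
      · have : (x ∉ t.reverse ∧ x ≠ m) := by simp [hmem, hm]
        simp only [pvKeepLast, if_pos this]
        rw [List.reverse_cons, ih]
        simp [hm]

-- the common closed form of B's result (needs no Pre_).
theorem pv_B_closed (lista : List Int) :
    reducir_lista_alt lista = (PySem.Set.ofList lista).filter (fun y => y ≠ lista.foldl max 0) := by
  unfold reducir_lista_alt
  rw [PySem.List.foldl_prod_mk
    (f := fun m x => if x > m then x else m)
    (g := fun d x => PySem.Dict.insert d x (PySem.Dict.getD d x 0 + 1))]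
  simp only
  rw [pv_runmax_eq]
  have hd : ∀ y, (lista.foldl (fun (d : PySem.Dict Int Int) x =>
      PySem.Dict.insert d x (PySem.Dict.getD d x 0 + 1))
      PySem.Dict.empty).getD y 0 = (lista.reverse.count y : Int) := by
    intro y
    rw [PySem.Dict.getD_foldl_insert_add_one, PySem.Dict.getD_empty, List.count_reverse]
    simp
  rw [pv_B_loop (lista.foldl max 0) lista.reverse _ [] hd, List.nil_append,
    pv_keepLast_reverse]

-- ===== VERDICT (by name: the statement is the Claim_ definition above) =====
theorem reducir_lista_spec : Claim_equal_reducir_lista := by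
  intro lista _ hpre
  unfold Spec_reducir_lista reducir_lista
  rw [PySem.List.foldl_prod_mk
    (f := fun a n => if n ∉ a then a ++ [n] else a)
    (g := fun m n => if n > m then n else m)]
  simp only
  rw [pv_dedup_eq_add, pv_runmax_eq]
  have hmem : lista.foldl max 0 ∈ lista := pv_mayor_mem lista hpre
  have hmemS : lista.foldl max 0 ∈ PySem.Set.ofList lista := by
    rw [PySem.Set.mem_ofList]; exact hmem
  rw [show lista.foldl PySem.Set.add [] = PySem.Set.ofList lista from
    (PySem.Set.ofList_eq_foldl lista).symm]
  rw [PySem.List.remove?_eq_some_erase _ _ hmemS, Option.getD_some]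
  rw [(PySem.Set.nodup_ofList lista).erase_eq_filter]
  rw [pv_B_closed]
  congr 1
  funext y
  by_cases h : y = lista.foldl max 0 <;> simp [h]
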